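-- pv_equiv track=rewrite | github.com/KashanRauf/CISC121_Assignment4 | functions.py | quick_string
-- ===== SOURCE A (Python) =====
-- def quick_string(my_word):
--     """
--     Sort a string from A-Z using recursive quick sort
--
--     Parameters:
--         my_word - string of maximum 10 uppercase letters and nothing else
--     Returns:
--         sorted_string - a new string after being sorted
--     """
--
--     # Checking the amount of unique letters instead of total in the base case
--     # This prevents errors caused by duplicate letters
--     unique_letters = ""
--     for i in my_word:
--         if i not in unique_letters:
--             unique_letters += i
--
--     if len(unique_letters) <= 1:
--         return my_word
--     else:
--         pivot = my_word[(len(my_word)-1) // 2]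
--         less, equal, greater = "", "", ""
--         for i in my_word:
--             if i < pivot:
--                 less += i
--             elif i > pivot:
--                 greater += i
--             else:
--                 equal += i
--         sorted_string = quick_string(less) + quick_string(equal) + quick_string (greater)
--         return (sorted_string)
-- ===== SOURCE B (Python) =====
-- def quick_string(my_word):
--     counts = {}
--     for ch in my_word:
--         counts[ch] = counts.get(ch, 0) + 1
--     return "".join(ch * counts[ch] for ch in sorted(counts))
-- ===== Notes on version B (the rewrite author's own statement) =====
-- stated objective: faster
-- what changed: Replaced the recursive three-way quicksort on strings with a one-pass character frequency dictionary whose sorted keys are expanded by their counts (a counting sort, no recursion and no quadratic string concatenation).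
import Mathlib
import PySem

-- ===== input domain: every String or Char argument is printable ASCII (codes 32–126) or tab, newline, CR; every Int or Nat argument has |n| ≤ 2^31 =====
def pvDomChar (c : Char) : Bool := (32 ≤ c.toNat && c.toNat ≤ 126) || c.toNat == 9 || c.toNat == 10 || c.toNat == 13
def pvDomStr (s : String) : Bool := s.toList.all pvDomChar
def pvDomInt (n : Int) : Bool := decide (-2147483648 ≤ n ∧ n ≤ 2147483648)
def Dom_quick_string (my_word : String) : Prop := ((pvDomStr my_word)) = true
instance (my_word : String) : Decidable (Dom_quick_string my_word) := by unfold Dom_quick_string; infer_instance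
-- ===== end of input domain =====

-- B replaces A's recursive three-way quicksort by a one-pass character-count
-- dictionary expanded over its sorted keys (a counting sort); same results, no recursion.

-- ===== PORT A =====
-- the 'unique_letters' accumulation loop of A
def pvDedupLoop (cs : List Char) : List Char :=
  cs.foldl (fun acc i => if i ∈ acc then acc else acc ++ [i]) []

-- the less/equal/greater partition loop of A (strings as lists of chars)
def pvPartLoop (p : Char) (cs : List Char) : List Char × List Char × List Char :=
  cs.foldl (fun acc i =>
    if i < p then (acc.1 ++ [i], acc.2.1, acc.2.2)
    else if p < i then (acc.1, acc.2.1, acc.2.2 ++ [i])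
    else (acc.1, acc.2.1 ++ [i], acc.2.2)) ([], [], [])

-- (the lemmas below are cited by qsChars' decreasing_by, so they stay above the port)
theorem pvPartLoop_aux (p : Char) (cs : List Char) : ∀ (a b c : List Char),
    cs.foldl (fun acc i =>
      if i < p then (acc.1 ++ [i], acc.2.1, acc.2.2)
      else if p < i then (acc.1, acc.2.1, acc.2.2 ++ [i])
      else (acc.1, acc.2.1 ++ [i], acc.2.2)) (a, b, c)
    = (a ++ cs.filter (fun i => decide (i < p)),
       b ++ cs.filter (fun i => i == p),
       c ++ cs.filter (fun i => decide (p < i))) := by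
  induction cs with
  | nil => intro a b c; simp
  | cons x xs ih =>
    intro a b c
    simp only [List.foldl_cons, List.filter_cons]
    rcases lt_trichotomy x p with h | h | h
    · simp [h, not_lt_of_gt h, ne_of_lt h, ih, List.append_assoc]
    · simp [h, ih, List.append_assoc]
    · simp [h, not_lt_of_gt h, (ne_of_gt h), ih, List.append_assoc]

theorem pvPartLoop_eq (p : Char) (cs : List Char) :
    pvPartLoop p cs = (cs.filter (fun i => decide (i < p)),
                       cs.filter (fun i => i == p),
                       cs.filter (fun i => decide (p < i))) := by
  simpa using pvPartLoop_aux p cs [] [] []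

theorem pvDedupLoop_mem_aux (cs : List Char) : ∀ (acc : List Char) (x : Char),
    x ∈ cs.foldl (fun acc i => if i ∈ acc then acc else acc ++ [i]) acc ↔ x ∈ acc ∨ x ∈ cs := by
  induction cs with
  | nil => intro acc x; simp
  | cons y ys ih =>
    intro acc x
    simp only [List.foldl_cons]
    by_cases hy : y ∈ acc
    · rw [if_pos hy, ih]
      constructor
      · rintro (h | h) <;> simp [h]
      · rintro (h | h)
        · exact Or.inl h
        · rcases List.mem_cons.mp h with rfl | h
          · exact Or.inl hy
          · exact Or.inr h
    · rw [if_neg hy, ih]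
      simp [List.mem_append, List.mem_cons, or_assoc, or_comm]
      tauto

theorem pvDedupLoop_mem (cs : List Char) (x : Char) : x ∈ pvDedupLoop cs ↔ x ∈ cs := by
  unfold pvDedupLoop; rw [pvDedupLoop_mem_aux]; simp

theorem pvDedupLoop_nodup_aux (cs : List Char) : ∀ (acc : List Char), acc.Nodup →
    (cs.foldl (fun acc i => if i ∈ acc then acc else acc ++ [i]) acc).Nodup := by
  induction cs with
  | nil => intro acc h; simpa
  | cons y ys ih =>
    intro acc h
    simp only [List.foldl_cons]
    by_cases hy : y ∈ acc
    · rw [if_pos hy]; exact ih acc h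
    · rw [if_neg hy]
      refine ih _ ((List.nodup_append).mpr ⟨h, List.nodup_singleton y, ?_⟩)
      intro a ha b hb
      obtain rfl := List.mem_singleton.mp hb
      exact fun e => hy (e ▸ ha)

theorem pvDedupLoop_nodup (cs : List Char) : (pvDedupLoop cs).Nodup :=
  pvDedupLoop_nodup_aux cs [] List.nodup_nil

-- a char distinct from x exists in cs when the unique-letters string has ≥ 2 chars
theorem pv_exists_ne (cs : List Char) (h : ¬ (pvDedupLoop cs).length ≤ 1) (x : Char) :
    ∃ y ∈ cs, y ≠ x := by
  by_contra hall
  push Not at hall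
  apply h
  rcases hu : pvDedupLoop cs with _ | ⟨a, _ | ⟨b, t⟩⟩
  · simp
  · simp
  · exfalso
    have ha : a ∈ cs := (pvDedupLoop_mem cs a).mp (by simp [hu])
    have hb : b ∈ cs := (pvDedupLoop_mem cs b).mp (by simp [hu])
    have hnd := pvDedupLoop_nodup cs
    rw [hu] at hnd
    have : a ≠ b := by simp [List.nodup_cons] at hnd; tauto
    exact this ((hall a ha).trans (hall b hb).symm)

theorem pv_pivot_mem (cs : List Char) (h : cs ≠ []) :
    PySem.List.pyGetD cs (PySem.Int.floordiv ((cs.length : Int) - 1) 2) 'A' ∈ cs := by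
  have hlen : 1 ≤ cs.length := List.length_pos_iff.mpr h
  have h1 : ((cs.length : Int) - 1) = ((cs.length - 1 : Nat) : Int) := by push_cast [hlen]; ring
  rw [h1, show (2 : Int) = ((2 : Nat) : Int) from rfl, PySem.Int.floordiv_natCast,
    PySem.List.pyGetD_natCast]
  have hidx : (cs.length - 1) / 2 < cs.length := by omega
  rw [List.getD_eq_getElem cs 'A' hidx]
  exact List.getElem_mem hidx

-- the three partition parts are strictly shorter when the recursion happens
theorem pv_less_short (cs : List Char) (piv : Char) (hp : piv ∈ cs) :
    (cs.filter (fun i => decide (i < piv))).length < cs.length :=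
  List.length_filter_lt_length_iff_exists.mpr ⟨piv, hp, by simp⟩

theorem pv_greater_short (cs : List Char) (piv : Char) (hp : piv ∈ cs) :
    (cs.filter (fun i => decide (piv < i))).length < cs.length :=
  List.length_filter_lt_length_iff_exists.mpr ⟨piv, hp, by simp⟩

theorem pv_equal_short (cs : List Char) (piv : Char) (h : ¬ (pvDedupLoop cs).length ≤ 1) :
    (cs.filter (fun i => i == piv)).length < cs.length := by
  obtain ⟨y, hy, hne⟩ := pv_exists_ne cs h piv
  exact List.length_filter_lt_length_iff_exists.mpr ⟨y, hy, by simp [hne]⟩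

theorem pv_cs_ne_nil (cs : List Char) (h : ¬ (pvDedupLoop cs).length ≤ 1) : cs ≠ [] := by
  rintro rfl; exact h (by simp [pvDedupLoop])

-- transliteration of A on the char list: dedup loop, base case, pivot, partition loop, recurse
def qsChars (cs : List Char) : List Char :=
  let uniq := pvDedupLoop cs
  if uniq.length ≤ 1 then cs
  else
    let pivot := PySem.List.pyGetD cs (PySem.Int.floordiv ((cs.length : Int) - 1) 2) 'A'
    -- the index is in range here (cs ≠ []), so the 'A' default is never used
    let t := pvPartLoop pivot cs
    qsChars t.1 ++ qsChars t.2.1 ++ qsChars t.2.2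
termination_by cs.length
decreasing_by
  · rw [pvPartLoop_eq]
    exact pv_less_short cs _ (pv_pivot_mem cs (pv_cs_ne_nil cs (by assumption)))
  · rw [pvPartLoop_eq]
    exact pv_equal_short cs _ (by assumption)
  · rw [pvPartLoop_eq]
    exact pv_greater_short cs _ (pv_pivot_mem cs (pv_cs_ne_nil cs (by assumption)))

def quick_string (my_word : String) : String := String.ofList (qsChars my_word.toList)

-- ===== PORT B =====
-- transliteration of Source B: count chars in a dict, then expand sorted keys by their counts
def altChars (cs : List Char) : List Char :=
  let counts := cs.foldl (fun d ch => d.insert ch (d.getD ch 0 + 1))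
    (PySem.Dict.empty : PySem.Dict Char Int)
  (PySem.List.sorted counts.keys (fun x => x) false).flatMap
    (fun ch => List.replicate (counts.getD ch 0).toNat ch)
    -- ch * counts[ch]: the count is positive for every key, so .toNat is exact

def quick_string_alt (my_word : String) : String := String.ofList (altChars my_word.toList)

-- ===== PRECONDITION & SPEC =====
def Spec_quick_string (my_word : String) (out : String) : Prop := out = quick_string_alt my_word
instance (my_word : String) (out : String) : Decidable (Spec_quick_string my_word out) := by unfold Spec_quick_string; infer_instance

-- ===== CLAIM (what is proved, stated in full; the proofs are below) =====
def Claim_equal_quick_string : Prop := ∀ (my_word : String), Dom_quick_string my_word → Spec_quick_string my_word (quick_string my_word)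

-- ===== LEMMAS AND PROOFS =====

-- base case of A: at most one distinct letter means the list is already sorted
theorem pv_all_eq (cs : List Char) (h : (pvDedupLoop cs).length ≤ 1) :
    ∀ x ∈ cs, ∀ y ∈ cs, x = y := by
  intro x hx y hy
  rcases hu : pvDedupLoop cs with _ | ⟨a, _ | ⟨b, t⟩⟩
  · exact absurd ((pvDedupLoop_mem cs x).mpr hx) (by simp [hu])
  · have hx' := (pvDedupLoop_mem cs x).mpr hx
    have hy' := (pvDedupLoop_mem cs y).mpr hy
    rw [hu] at hx' hy'
    simp at hx' hy'; rw [hx', hy']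
  · rw [hu] at h; simp at h

-- the three filters together are a permutation of cs
theorem pv_tri_perm (cs : List Char) (p : Char) :
    (cs.filter (fun i => decide (i < p)) ++ cs.filter (fun i => i == p)
      ++ cs.filter (fun i => decide (p < i))).Perm cs := by
  rw [List.perm_iff_count]
  intro a
  simp only [List.count_append]
  have hlt : (cs.filter (fun i => decide (i < p))).count a = if a < p then cs.count a else 0 := by
    split_ifs with h
    · exact List.count_filter (by simp [h])
    · rw [List.count_eq_zero]; intro hm; rw [List.mem_filter] at hm; simp at hm; exact h hm.2
  have heq : (cs.filter (fun i => i == p)).count a = if a = p then cs.count a else 0 := by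
    split_ifs with h
    · exact List.count_filter (by simp [h])
    · rw [List.count_eq_zero]; intro hm; rw [List.mem_filter] at hm; simp at hm; exact h hm.2
  have hgt : (cs.filter (fun i => decide (p < i))).count a = if p < a then cs.count a else 0 := by
    split_ifs with h
    · exact List.count_filter (by simp [h])
    · rw [List.count_eq_zero]; intro hm; rw [List.mem_filter] at hm; simp at hm; exact h hm.2
  rw [hlt, heq, hgt]
  rcases lt_trichotomy a p with h | h | h
  · simp [h, h.ne, h.asymm]
  · simp [h]
  · simp [h, h.ne', h.asymm]

-- A's recursion produces sorted(cs)
theorem qsChars_eq_sorted : ∀ (n : Nat) (cs : List Char), cs.length ≤ n →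
    qsChars cs = PySem.List.sorted cs (fun x => x) false := by
  intro n
  induction n with
  | zero =>
    intro cs hcs
    have : cs = [] := List.eq_nil_of_length_eq_zero (Nat.le_zero.mp hcs)
    subst this
    rw [qsChars]
    simp [pvDedupLoop, PySem.List.sorted]
  | succ n ih =>
    intro cs hcs
    rw [qsChars]
    by_cases h : (pvDedupLoop cs).length ≤ 1
    · rw [if_pos h]
      exact (PySem.List.sorted_eq_self_of_pairwise cs _
        (List.pairwise_of_forall_mem_list (fun a ha b hb => le_of_eq (pv_all_eq cs h a ha b hb)))).symm
    · rw [if_neg h]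
      set piv := PySem.List.pyGetD cs (PySem.Int.floordiv ((cs.length : Int) - 1) 2) 'A' with hpiv
      simp only [pvPartLoop_eq]
      have hmem := pv_pivot_mem cs (pv_cs_ne_nil cs h)
      rw [ih _ (by have := pv_less_short cs piv hmem; omega),
          ih _ (by have := pv_equal_short cs piv h; omega),
          ih _ (by have := pv_greater_short cs piv hmem; omega)]
      refine (PySem.List.sorted_id_eq_of_perm_of_pairwise cs _ ?_ ?_).symm
      · exact List.Perm.trans
          (List.Perm.append
            (List.Perm.append (PySem.List.sorted_perm _ _ _) (PySem.List.sorted_perm _ _ _))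
            (PySem.List.sorted_perm _ _ _))
          (pv_tri_perm cs piv)
      · rw [List.pairwise_append, List.pairwise_append]
        refine ⟨⟨PySem.List.sorted_pairwise _ _, PySem.List.sorted_pairwise _ _, ?_⟩,
                PySem.List.sorted_pairwise _ _, ?_⟩
        · intro a ha b hb
          rw [PySem.List.mem_sorted, List.mem_filter] at ha hb
          have h1 : a < piv := by simpa using ha.2
          have h2 : b = piv := by simpa using hb.2
          exact le_of_lt (h2 ▸ h1)
        · intro a ha b hb
          rw [List.mem_append] at ha
          rw [PySem.List.mem_sorted, List.mem_filter] at hb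
          have h2 : piv < b := by simpa using hb.2
          rcases ha with ha | ha <;> rw [PySem.List.mem_sorted, List.mem_filter] at ha
          · have : a < piv := by simpa using ha.2
            exact le_of_lt (this.trans h2)
          · have : a = piv := by simpa using ha.2
            exact le_of_lt (this ▸ h2)

-- B: count of the expansion of a nodup key list
theorem pv_flat_count (cs : List Char) (a : Char) : ∀ (ks : List Char), ks.Nodup →
    (ks.flatMap (fun k => List.replicate (cs.count k) k)).count a
      = if a ∈ ks then cs.count a else 0 := by
  intro ks
  induction ks with
  | nil => simp
  | cons k t ih =>
    intro hnd
    rw [List.nodup_cons] at hnd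
    rw [List.flatMap_cons, List.count_append, ih hnd.2, List.count_replicate]
    by_cases hak : a = k
    · subst hak; simp [hnd.1]
    · simp [Ne.symm hak, hak]

-- B: the expansion of a strictly increasing key list is sorted
theorem pv_flat_pairwise (cs : List Char) : ∀ (ks : List Char), ks.Pairwise (· < ·) →
    (ks.flatMap (fun k => List.replicate (cs.count k) k)).Pairwise (· ≤ ·) := by
  intro ks
  induction ks with
  | nil => simp
  | cons k t ih =>
    intro hpw
    rw [List.pairwise_cons] at hpw
    rw [List.flatMap_cons, List.pairwise_append]
    refine ⟨List.pairwise_replicate.mpr (Or.inr le_rfl), ih hpw.2, ?_⟩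
    intro a ha b hb
    rw [List.eq_of_mem_replicate ha]
    rw [List.mem_flatMap] at hb
    obtain ⟨k', hk', hb⟩ := hb
    rw [List.eq_of_mem_replicate hb]
    exact le_of_lt (hpw.1 k' hk')

-- B produces sorted(cs)
theorem altChars_eq_sorted (cs : List Char) :
    altChars cs = PySem.List.sorted cs (fun x => x) false := by
  unfold altChars
  rw [PySem.Dict.foldl_insert_getD_add_one_eq_counter]
  simp only [PySem.Dict.getD_counter, PySem.Dict.keys_counter, Int.toNat_natCast]
  have hnd : (PySem.List.sorted (PySem.Set.ofList cs) (fun x => x) false).Nodup :=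
    (PySem.List.sorted_perm _ _ _).symm.nodup (PySem.Set.nodup_ofList cs)
  refine (PySem.List.sorted_id_eq_of_perm_of_pairwise cs _ ?_ ?_).symm
  · rw [List.perm_iff_count]
    intro a
    rw [pv_flat_count cs a _ hnd]
    by_cases ha : a ∈ cs
    · simp [PySem.List.mem_sorted, PySem.Set.mem_ofList, ha]
    · simp [PySem.List.mem_sorted, PySem.Set.mem_ofList, ha, List.count_eq_zero.mpr ha]
  · exact pv_flat_pairwise cs _ (PySem.List.sorted_ofList_pairwise_lt cs)

-- ===== VERDICT (by name: the statement is the Claim_ definition above) =====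
theorem quick_string_spec : Claim_equal_quick_string := by
  intro s _
  unfold Spec_quick_string quick_string quick_string_alt
  rw [qsChars_eq_sorted s.toList.length s.toList le_rfl, altChars_eq_sorted]
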